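-- pv_equiv track=rewrite | github.com/Tsahi-Elkayam/clouptimizer | src/analysis/reserved_instances.py | _calculate_usage_percentiles
-- ===== SOURCE A (Python) =====
-- from typing import List, Dict, Any, Optional, Tuple, Set
--
-- def _calculate_usage_percentiles(usage_history: List[Dict]) -> Dict[str, float]:
--     """Calculate usage percentiles"""
--     hours = [u.get('hours', 0) for u in usage_history]
--     if not hours:
--         return {'p30': 0, 'p50': 0, 'p70': 0, 'p90': 0}
--
--     sorted_hours = sorted(hours)
--     n = len(sorted_hours)
--
--     return {
--         'p30': sorted_hours[int(n * 0.3)],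
--         'p50': sorted_hours[int(n * 0.5)],
--         'p70': sorted_hours[int(n * 0.7)],
--         'p90': sorted_hours[int(n * 0.9)]
--     }
-- ===== SOURCE B (Python) =====
-- def _calculate_usage_percentiles(usage_history):
--     """Calculate usage percentiles via iterative three-way quickselect (no full sort)."""
--     hours = [u.get('hours', 0) for u in usage_history]
--     if not hours:
--         return {'p30': 0, 'p50': 0, 'p70': 0, 'p90': 0}
--     n = len(hours)
--
--     def kth(xs, k):
--         # k-th smallest (0-based) by three-way partitioning around a middle pivot
--         while xs:
--             p = xs[len(xs) // 2]
--             lt = [x for x in xs if x < p]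
--             if k < len(lt):
--                 xs = lt
--                 continue
--             neq = len([x for x in xs if x == p])
--             if k < len(lt) + neq:
--                 return p
--             k -= len(lt) + neq
--             xs = [x for x in xs if p < x]
--         return 0
--
--     return {'p30': kth(hours, int(n * 0.3)),
--             'p50': kth(hours, int(n * 0.5)),
--             'p70': kth(hours, int(n * 0.7)),
--             'p90': kth(hours, int(n * 0.9))}
-- ===== Notes on version B (the rewrite author's own statement) =====
-- stated objective: alternative
-- what changed: B replaces A's full sort followed by four indexings with an iterative three-way quickselect that extracts each of the four order statistics directly, never sorting the list.
import Mathlib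
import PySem

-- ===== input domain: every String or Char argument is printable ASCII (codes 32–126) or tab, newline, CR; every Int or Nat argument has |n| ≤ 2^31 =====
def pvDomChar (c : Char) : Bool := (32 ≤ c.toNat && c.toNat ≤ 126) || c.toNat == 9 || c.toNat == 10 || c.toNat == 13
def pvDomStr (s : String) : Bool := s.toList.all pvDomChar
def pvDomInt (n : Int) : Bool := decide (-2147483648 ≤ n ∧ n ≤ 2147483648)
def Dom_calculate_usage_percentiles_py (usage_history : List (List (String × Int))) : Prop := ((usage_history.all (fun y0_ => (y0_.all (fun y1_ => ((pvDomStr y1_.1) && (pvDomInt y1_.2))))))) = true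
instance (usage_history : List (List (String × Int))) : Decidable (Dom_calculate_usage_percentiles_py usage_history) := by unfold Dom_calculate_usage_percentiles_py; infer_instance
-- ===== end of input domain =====

-- B replaces A's full sort + four indexings with an iterative three-way quickselect
-- extracting each order statistic directly (alternative algorithm, not measured faster).

-- Shared index helper, used by BOTH ports: hand-port (exact where stated) of CPython's
-- `int(n * q)` for the double constants q = M·2⁻ˢ (0.3, 0.5, 0.7, 0.9): it simulates
-- IEEE-754 binary64 round-to-nearest-even of the exact product n·M·2⁻ˢ and floors;
-- `int(n*0.7)` really differs from 7*n//10 (e.g. n = 90), so the rounding is simulated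
-- exactly with integers (checked against CPython over 0 ≤ n ≤ 10^15 samples).
def pvIdx (n M S : Nat) : Nat :=
  let a := n * M
  let t := PySem.Int.bitLength (a : Int)
  if t ≤ 53 then a >>> S
  else
    let sh := t - 53
    let q := a >>> sh
    let r := a % (2 ^ sh)
    let half := 2 ^ (sh - 1)
    let q' := if half < r ∨ (r = half ∧ q % 2 = 1) then q + 1 else q
    (q' <<< sh) >>> S

-- ===== PORT A =====
def calculate_usage_percentiles_py (usage_history : List (List (String × Int))) : List (String × Int) :=
  let hours := usage_history.map (fun u => PySem.Dict.getD (PySem.Dict.mk u) "hours" 0)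
  if hours = [] then [("p30", 0), ("p50", 0), ("p70", 0), ("p90", 0)]
  else
    let sorted_hours := PySem.List.sorted hours (fun x => x) false
    let n := sorted_hours.length
    -- indices int(n*0.3) … are provably within range for these list lengths, so
    -- Python's sorted_hours[i] never raises; pyGetD's default is unreachable
    [("p30", PySem.List.pyGetD sorted_hours ((pvIdx n 5404319552844595 54 : Nat) : Int) 0),
     ("p50", PySem.List.pyGetD sorted_hours ((pvIdx n 1 1 : Nat) : Int) 0),
     ("p70", PySem.List.pyGetD sorted_hours ((pvIdx n 6305039478318694 53 : Nat) : Int) 0),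
     ("p90", PySem.List.pyGetD sorted_hours ((pvIdx n 8106479329266893 53 : Nat) : Int) 0)]

-- ===== PORT B =====
-- Source B's iterative `kth` while-loop, one fuel unit per iteration (fuel = initial length,
-- enough since the worked-on list strictly shrinks): three-way partition around the
-- middle element, descend into the part holding k.
def kthSelGo : Nat → List Int → Nat → Int
  | 0, _, _ => 0
  | fuel + 1, xs, k =>
    if xs = [] then 0
    else
      let p := xs.getD (xs.length / 2) 0
      let lt := xs.filter (fun x => x < p)
      if k < lt.length then kthSelGo fuel lt k
      else
        let neq := (xs.filter (fun x => x = p)).length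
        if k < lt.length + neq then p
        else kthSelGo fuel (xs.filter (fun x => p < x)) (k - (lt.length + neq))

def kthSel (xs : List Int) (k : Nat) : Int := kthSelGo xs.length xs k

def calculate_usage_percentiles_py_alt (usage_history : List (List (String × Int))) : List (String × Int) :=
  let hours := usage_history.map (fun u => PySem.Dict.getD (PySem.Dict.mk u) "hours" 0)
  if hours = [] then [("p30", 0), ("p50", 0), ("p70", 0), ("p90", 0)]
  else
    let n := hours.length
    [("p30", kthSel hours (pvIdx n 5404319552844595 54)),
     ("p50", kthSel hours (pvIdx n 1 1)),
     ("p70", kthSel hours (pvIdx n 6305039478318694 53)),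
     ("p90", kthSel hours (pvIdx n 8106479329266893 53))]

-- ===== PRECONDITION & SPEC =====
def Spec_calculate_usage_percentiles_py (usage_history : List (List (String × Int))) (out : List (String × Int)) : Prop := out = calculate_usage_percentiles_py_alt usage_history
instance (usage_history : List (List (String × Int))) (out : List (String × Int)) : Decidable (Spec_calculate_usage_percentiles_py usage_history out) := by unfold Spec_calculate_usage_percentiles_py; infer_instance

-- ===== CLAIM (what is proved, stated in full; the proofs are below) =====
def Claim_equal_calculate_usage_percentiles_py : Prop := ∀ (usage_history : List (List (String × Int))), Dom_calculate_usage_percentiles_py usage_history → Spec_calculate_usage_percentiles_py usage_history (calculate_usage_percentiles_py usage_history)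

-- ===== LEMMAS AND PROOFS =====

-- three-way partition of xs around p is a permutation of xs
lemma three_way_perm (p : Int) (xs : List Int) :
    (xs.filter (fun x => x < p) ++ (xs.filter (fun x => x = p) ++ xs.filter (fun x => p < x))).Perm xs := by
  rw [List.perm_iff_count]
  intro a
  simp only [List.count_append]
  have key : ∀ (q : Int → Bool), (q a = true → (xs.filter q).count a = xs.count a) ∧
      (q a = false → (xs.filter q).count a = 0) := by
    intro q
    refine ⟨fun h => List.count_filter h, fun h => ?_⟩
    refine List.count_eq_zero.mpr (fun hmem => ?_)
    have := (List.mem_filter.mp hmem).2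
    rw [h] at this; exact Bool.noConfusion this
  rcases lt_trichotomy a p with h | h | h
  · rw [(key _).1 (by simpa using h), (key _).2 (by simp; omega), (key _).2 (by simp; omega)]
    omega
  · rw [(key _).2 (by simp; omega), (key _).1 (by simpa using h), (key _).2 (by simp; omega)]
    omega
  · rw [(key _).2 (by simp; omega), (key _).2 (by simp; omega), (key _).1 (by simpa using h)]
    omega

-- sorting splits along a three-way partition
lemma sorted_three_way (p : Int) (xs : List Int) :
    PySem.List.sorted xs (fun x => x) false
      = PySem.List.sorted (xs.filter (fun x => x < p)) (fun x => x) false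
        ++ (xs.filter (fun x => x = p)
        ++ PySem.List.sorted (xs.filter (fun x => p < x)) (fun x => x) false) := by
  apply PySem.List.sorted_id_eq_of_perm_of_pairwise
  · exact (List.Perm.append (PySem.List.sorted_perm _ _ _)
      (List.Perm.append (List.Perm.refl _) (PySem.List.sorted_perm _ _ _))).trans
      (three_way_perm p xs)
  · have hL : ∀ x ∈ PySem.List.sorted (xs.filter (fun x => x < p)) (fun x => x) false, x < p := by
      intro x hx
      have := (PySem.List.mem_sorted _ _ _ _).mp hx
      simpa using (List.mem_filter.mp this).2
    have hE : ∀ x ∈ xs.filter (fun x => x = p), x = p := by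
      intro x hx; simpa using (List.mem_filter.mp hx).2
    have hG : ∀ x ∈ PySem.List.sorted (xs.filter (fun x => p < x)) (fun x => x) false, p < x := by
      intro x hx
      have := (PySem.List.mem_sorted _ _ _ _).mp hx
      simpa using (List.mem_filter.mp this).2
    rw [List.pairwise_append]
    refine ⟨PySem.List.sorted_pairwise _ _, ?_, ?_⟩
    · rw [List.pairwise_append]
      refine ⟨?_, PySem.List.sorted_pairwise _ _, ?_⟩
      · exact List.Pairwise.imp (fun h => le_of_eq h)
          (List.pairwise_of_forall_mem_list
            (fun a ha b hb => (hE a ha).trans (hE b hb).symm))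
      · intro a ha b hb
        have := hE a ha; have := hG b hb; omega
    · intro a ha b hb
      have := hL a ha
      rcases List.mem_append.mp hb with hb | hb
      · have := hE b hb; omega
      · have := hG b hb; omega

-- quickselect computes sorted(xs)[k] (with default 0 past the end)
lemma kthSelGo_eq_sorted_getD :
    ∀ (fuel : Nat) (xs : List Int), xs.length ≤ fuel → ∀ (k : Nat),
      kthSelGo fuel xs k = (PySem.List.sorted xs (fun x => x) false).getD k 0 := by
  intro fuel
  induction fuel with
  | zero =>
    intro xs hlen k
    have hx : xs = [] := List.length_eq_zero_iff.mp (Nat.le_zero.mp hlen)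
    subst hx
    simp [kthSelGo, PySem.List.sorted]
  | succ n ih =>
    intro xs hlen k
    by_cases hx : xs = []
    · subst hx; simp [kthSelGo, PySem.List.sorted]
    · simp only [kthSelGo, hx, if_false]
      set p := xs.getD (xs.length / 2) 0 with hp
      have hpmem : p ∈ xs := by
        rw [hp, List.getD_eq_getElem _ _ (Nat.div_lt_self (List.length_pos_iff.mpr hx) one_lt_two)]
        exact List.getElem_mem _
      set L := xs.filter (fun x => x < p) with hLdef
      set E := xs.filter (fun x => x = p) with hEdef
      set G := xs.filter (fun x => p < x) with hGdef
      have hLlt : L.length < xs.length := by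
        rw [hLdef]
        exact List.length_filter_lt_length_iff_exists.mpr ⟨p, hpmem, by simp⟩
      have hGlt : G.length < xs.length := by
        rw [hGdef]
        exact List.length_filter_lt_length_iff_exists.mpr ⟨p, hpmem, by simp⟩
      have hsplit := sorted_three_way p xs
      rw [← hLdef, ← hEdef, ← hGdef] at hsplit
      rw [hsplit]
      have hlenL : (PySem.List.sorted L (fun x => x) false).length = L.length :=
        PySem.List.length_sorted _ _ _
      by_cases h1 : k < L.length
      · simp only [h1, if_true]
        rw [List.getD_append _ _ _ _ (by omega)]
        exact ih L (by omega) k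
      · simp only [h1, if_false]
        rw [List.getD_append_right _ _ _ _ (by omega), hlenL]
        by_cases h2 : k < L.length + E.length
        · simp only [h2, if_true]
          have hkE : k - L.length < E.length := by omega
          rw [List.getD_append _ _ _ _ hkE, List.getD_eq_getElem _ _ hkE]
          have hall : ∀ x ∈ E, x = p := by
            intro x hxE
            rw [hEdef] at hxE
            simpa using (List.mem_filter.mp hxE).2
          exact (hall _ (List.getElem_mem _)).symm
        · simp only [h2, if_false]
          rw [List.getD_append_right _ _ _ _ (by omega)]
          rw [ih G (by omega) (k - (L.length + E.length))]
          congr 1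
          omega

-- ===== VERDICT (by name: the statement is the Claim_ definition above) =====
theorem calculate_usage_percentiles_py_spec : Claim_equal_calculate_usage_percentiles_py := by
  intro usage_history _
  unfold Spec_calculate_usage_percentiles_py
  unfold calculate_usage_percentiles_py calculate_usage_percentiles_py_alt
  set hours := usage_history.map (fun u => PySem.Dict.getD (PySem.Dict.mk u) "hours" 0) with hh
  by_cases hne : hours = []
  · simp [hne]
  · simp only [hne, if_false]
    have hlen : (PySem.List.sorted hours (fun x => x) false).length = hours.length :=
      PySem.List.length_sorted _ _ _
    have hk : ∀ (M S : Nat),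
        PySem.List.pyGetD (PySem.List.sorted hours (fun x => x) false)
          ((pvIdx (PySem.List.sorted hours (fun x => x) false).length M S : Nat) : Int) 0
        = kthSel hours (pvIdx hours.length M S) := by
      intro M S
      rw [PySem.List.pyGetD_natCast, hlen]
      exact (kthSelGo_eq_sorted_getD hours.length hours (le_refl _) _).symm
    rw [hk, hk, hk, hk]
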